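-- pv_equiv track=rewrite | github.com/ashack7426/Hearts | Board.py | __actionToNums
-- ===== SOURCE A (Python) =====
-- from math import comb, fabs
--
-- def __actionToNums(action):
--     for x in range(13):
--         for y in range(x + 1, 13):
--             for z in range(y + 1, 13):
--                 num = comb(x, 1) + comb(y, 2) + comb(z, 3)
--
--                 if num == action:
--                     return [x, y, z]
--     return []
-- ===== SOURCE B (Python) =====
-- from math import comb
--
-- def __actionToNums(action):
--     # Direct combinatorial-number-system decode instead of scanning all triples.
--     if action < 0 or action > 285:
--         return []
--     r = action
--     z = 2
--     while z + 1 < 13 and comb(z + 1, 3) <= r: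
--         z += 1
--     r -= comb(z, 3)
--     y = 1
--     while y + 1 < z and comb(y + 1, 2) <= r:
--         y += 1
--     r -= comb(y, 2)
--     x = r
--     if x < y:
--         return [x, y, z]
--     return []
-- ===== Notes on version B (the rewrite author's own statement) =====
-- stated objective: alternative
-- what changed: Replaces the triple nested scan over all ordered triples with a direct combinatorial-number-system decode (greedy largest z, then y, remainder is x) behind an in-range guard.
import Mathlib
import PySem

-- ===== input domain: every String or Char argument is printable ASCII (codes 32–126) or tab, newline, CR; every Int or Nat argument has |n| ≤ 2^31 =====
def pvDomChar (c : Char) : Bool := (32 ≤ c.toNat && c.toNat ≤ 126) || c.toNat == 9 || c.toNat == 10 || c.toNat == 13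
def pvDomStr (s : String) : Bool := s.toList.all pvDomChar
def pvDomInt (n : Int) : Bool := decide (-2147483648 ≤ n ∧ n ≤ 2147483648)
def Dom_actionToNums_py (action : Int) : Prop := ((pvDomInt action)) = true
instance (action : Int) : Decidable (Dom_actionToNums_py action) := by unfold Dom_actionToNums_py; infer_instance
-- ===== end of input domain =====

-- B decodes the combinatorial-number-system index directly (greedy largest z, then y,
-- remainder x) instead of A's triple nested scan over all ordered triples.

-- ===== PORT A =====
def combI (n k : Int) : Int := ((n.toNat).choose k.toNat : Int)

def azLoop (action x y : Int) : List Int → Option (List Int)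
  | [] => none
  | z :: zs =>
      if combI x 1 + combI y 2 + combI z 3 = action then some [x, y, z]
      else azLoop action x y zs

def ayLoop (action x : Int) : List Int → Option (List Int)
  | [] => none
  | y :: ys =>
      match azLoop action x y (PySem.List.pyRange (y + 1) 13 1) with
      | some r => some r
      | none => ayLoop action x ys

def axLoop (action : Int) : List Int → Option (List Int)
  | [] => none
  | x :: xs =>
      match ayLoop action x (PySem.List.pyRange (x + 1) 13 1) with
      | some r => some r
      | none => axLoop action xs

def actionToNums_py (action : Int) : List Int :=
  match axLoop action (PySem.List.pyRange 0 13 1) with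
  | some r => r
  | none => []


-- ===== PORT B =====
-- the two while loops, with fuel 13 ≥ the number of iterations either can make
def bZ (fuel : Nat) (r z : Int) : Int :=
  match fuel with
  | 0 => z
  | fuel + 1 => if z + 1 < 13 ∧ combI (z + 1) 3 ≤ r then bZ fuel r (z + 1) else z

def bY (fuel : Nat) (r y z : Int) : Int :=
  match fuel with
  | 0 => y
  | fuel + 1 => if y + 1 < z ∧ combI (y + 1) 2 ≤ r then bY fuel r (y + 1) z else y

def actionToNums_py_alt (action : Int) : List Int :=
  if action < 0 ∨ action > 285 then []
  else
    let z := bZ 13 action 2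
    let r := action - combI z 3
    let y := bY 13 r 1 z
    let r2 := r - combI y 2
    let x := r2
    if x < y then [x, y, z] else []


-- ===== PRECONDITION & SPEC =====
def Spec_actionToNums_py (action : Int) (out : List Int) : Prop := out = actionToNums_py_alt action
instance (action : Int) (out : List Int) : Decidable (Spec_actionToNums_py action out) := by unfold Spec_actionToNums_py; infer_instance

-- ===== CLAIM (what is proved, stated in full; the proofs are below) =====
def Claim_equal_actionToNums_py : Prop := ∀ (action : Int), Dom_actionToNums_py action → Spec_actionToNums_py action (actionToNums_py action)

-- ===== LEMMAS AND PROOFS =====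


-- A's inner-loop value is at most 12 + 66 + 220 = 298 and at least 0; hence for
-- action outside [0, 298] the scan finds nothing.
theorem azLoop_none (action x y : Int) (zs : List Int)
    (h : ∀ z ∈ zs, combI x 1 + combI y 2 + combI z 3 ≠ action) :
    azLoop action x y zs = none := by
  induction zs with
  | nil => rfl
  | cons z zs ih =>
      simp only [azLoop]
      rw [if_neg (h z (List.mem_cons_self))]
      exact ih (fun w hw => h w (List.mem_cons_of_mem _ hw))

theorem combI_nonneg (n k : Int) : 0 ≤ combI n k := Int.natCast_nonneg _

theorem combI_le (n k : Int) (m : Nat) (h : n ≤ (m : Int)) :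
    combI n k ≤ ((m.choose k.toNat : Nat) : Int) := by
  unfold combI
  exact_mod_cast Nat.choose_le_choose _ (by omega)

theorem ayLoop_none (action x : Int) (ys : List Int)
    (hx : x ≤ 12)
    (hys : ∀ y ∈ ys, y ≤ 12)
    (hout : action < 0 ∨ 298 < action) :
    ayLoop action x ys = none := by
  induction ys with
  | nil => rfl
  | cons y ys ih =>
      simp only [ayLoop]
      rw [azLoop_none]
      · exact ih (fun w hw => hys w (List.mem_cons_of_mem _ hw))
      · intro z hz
        have hy12 : y ≤ 12 := hys y List.mem_cons_self
        have hz12 : z ≤ 12 := by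
          have := (PySem.List.mem_pyRange_one.mp hz).2; omega
        have b1 : combI x 1 ≤ 12 := by simpa using combI_le x 1 12 hx
        have b2 : combI y 2 ≤ 66 := by simpa using combI_le y 2 12 hy12
        have b3 : combI z 3 ≤ 220 := by simpa using combI_le z 3 12 hz12
        have n1 := combI_nonneg x 1
        have n2 := combI_nonneg y 2
        have n3 := combI_nonneg z 3
        omega

theorem axLoop_none (action : Int) (xs : List Int)
    (hxs : ∀ x ∈ xs, x ≤ 12)
    (hout : action < 0 ∨ 298 < action) :
    axLoop action xs = none := by
  induction xs with
  | nil => rfl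
  | cons x xs ih =>
      have hx : x ≤ 12 := hxs x List.mem_cons_self
      have ih := ih (fun w hw => hxs w (List.mem_cons_of_mem _ hw))
      simp only [axLoop]
      have hx12 : x ≤ 12 := hx
      rw [ayLoop_none action x _ hx12 (fun y hy => by have := (PySem.List.mem_pyRange_one.mp hy).2; omega) hout]
      exact ih

set_option maxRecDepth 100000 in
theorem eq_small : ∀ n : Nat, n < 300 → actionToNums_py (n : Int) = actionToNums_py_alt (n : Int) := by
  decide

-- ===== VERDICT (by name: the statement is the Claim_ definition above) =====
theorem actionToNums_py_spec : Claim_equal_actionToNums_py := by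
  intro action _
  unfold Spec_actionToNums_py
  by_cases h : 0 ≤ action ∧ action < 300
  · obtain ⟨h0, h1⟩ := h
    have : action = ((action.toNat : Nat) : Int) := by omega
    rw [this]
    exact eq_small action.toNat (by omega)
  · have hout : action < 0 ∨ 298 < action := by omega
    have hA : actionToNums_py action = [] := by
      unfold actionToNums_py
      rw [axLoop_none action _ (fun x hx => by have := (PySem.List.mem_pyRange_one.mp hx).2; omega) hout]
    have hB : actionToNums_py_alt action = [] := by
      unfold actionToNums_py_alt
      rw [if_pos (by omega)]
    rw [hA, hB]
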